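-- pv_equiv track=rewrite | github.com/wrietersco/quran-research-software | src/chat/step5_engine.py | _safe_total_combos
-- ===== SOURCE A (Python) =====
-- _SQLITE_MAX_INT = 9223372036854775807
--
-- def _safe_total_combos(entry_counts: list[int]) -> int:
--     if not entry_counts:
--         return 0
--     p = 1
--     for n in entry_counts:
--         k = max(1, int(n))
--         if p > _SQLITE_MAX_INT // k:
--             return _SQLITE_MAX_INT
--         p *= k
--     return p
-- ===== SOURCE B (Python) =====
-- _SQLITE_MAX_INT = 9223372036854775807
--
-- def _safe_total_combos(entry_counts: list[int]) -> int:
--     if not entry_counts: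
--         return 0
--
--     def tree(xs):
--         if len(xs) == 1:
--             return max(1, int(xs[0]))
--         mid = len(xs) // 2
--         return tree(xs[:mid]) * tree(xs[mid:])
--
--     return min(tree(entry_counts), _SQLITE_MAX_INT)
-- ===== Notes on version B (the rewrite author's own statement) =====
-- stated objective: alternative
-- what changed: B replaces A's guarded left-to-right accumulator (per-step overflow check with early return) by a divide-and-conquer recursion: it computes the exact product of max(1,n) over a balanced binary split of the list using Python's unbounded ints, then clamps once at the end with min(., _SQLITE_MAX_INT).
import Mathlib
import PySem

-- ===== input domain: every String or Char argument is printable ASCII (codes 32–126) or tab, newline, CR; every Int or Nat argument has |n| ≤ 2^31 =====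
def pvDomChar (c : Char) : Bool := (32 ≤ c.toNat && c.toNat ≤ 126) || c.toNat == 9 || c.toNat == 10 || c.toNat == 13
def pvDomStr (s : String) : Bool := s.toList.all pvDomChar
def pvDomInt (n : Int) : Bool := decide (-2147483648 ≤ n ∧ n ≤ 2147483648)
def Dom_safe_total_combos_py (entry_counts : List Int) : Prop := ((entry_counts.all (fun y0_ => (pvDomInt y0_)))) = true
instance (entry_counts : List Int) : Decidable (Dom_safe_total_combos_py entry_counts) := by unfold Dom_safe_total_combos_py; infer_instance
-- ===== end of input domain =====

-- B replaces A's guarded single pass by a divide-and-conquer product with one final clamp (objective: alternative).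

-- ===== PORT A =====
def pvSqliteMax : Int := 9223372036854775807

-- A's loop: per-step overflow check with early return
def pvALoop (p : Int) : List Int → Int
  | [] => p
  | n :: rest =>
    let k : Int := max 1 n
    if p > PySem.Int.floordiv pvSqliteMax k then pvSqliteMax
    else pvALoop (p * k) rest

def safe_total_combos_py (entry_counts : List Int) : Int :=
  if entry_counts = [] then 0 else pvALoop 1 entry_counts

-- ===== PORT B =====
-- Source B's inner 'tree': recursion on a balanced split; xs[:mid] / xs[mid:] with
-- 0 ≤ mid ≤ len(xs) are exactly List.take mid / List.drop mid, and len(xs)//2 on a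
-- nonnegative length is Nat division. (tree is never called on [] in Source B; the []
-- branch here is unreachable filler.)
def pvTree (xs : List Int) : Int :=
  match xs with
  | [] => 1
  | [x] => max 1 x
  | a :: b :: rest =>
    let ys := a :: b :: rest
    pvTree (ys.take (ys.length / 2)) * pvTree (ys.drop (ys.length / 2))
termination_by xs.length
decreasing_by
  · simp [List.length_take]; omega
  · simp [List.length_drop]; omega

def safe_total_combos_py_alt (entry_counts : List Int) : Int :=
  if entry_counts = [] then 0 else min (pvTree entry_counts) pvSqliteMax

-- ===== PRECONDITION & SPEC =====
def Spec_safe_total_combos_py (entry_counts : List Int) (out : Int) : Prop := out = safe_total_combos_py_alt entry_counts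
instance (entry_counts : List Int) (out : Int) : Decidable (Spec_safe_total_combos_py entry_counts out) := by unfold Spec_safe_total_combos_py; infer_instance

-- ===== CLAIM (what is proved, stated in full; the proofs are below) =====
def Claim_equal_safe_total_combos_py : Prop := ∀ (entry_counts : List Int), Dom_safe_total_combos_py entry_counts → Spec_safe_total_combos_py entry_counts (safe_total_combos_py entry_counts)

-- ===== LEMMAS AND PROOFS =====
-- the exact product of max(1, n) over the list
def pvP (xs : List Int) : Int := (xs.map (fun n => max 1 n)).prod

theorem pvP_cons (n : Int) (xs : List Int) : pvP (n :: xs) = max 1 n * pvP xs := by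
  simp [pvP]

theorem pvP_append (xs ys : List Int) : pvP (xs ++ ys) = pvP xs * pvP ys := by
  simp [pvP]

theorem pvP_pos (xs : List Int) : 1 ≤ pvP xs := by
  induction xs with
  | nil => simp [pvP]
  | cons n rest ih =>
    rw [pvP_cons]
    have : (1 : Int) ≤ max 1 n := le_max_left 1 n
    nlinarith

-- Source B's tree computes the exact product on nonempty lists
theorem pvTree_eq (xs : List Int) (h : xs ≠ []) : pvTree xs = pvP xs := by
  induction hn : xs.length using Nat.strong_induction_on generalizing xs with
  | _ len ih =>
    match xs, h with
    | [x], _ => simp [pvTree, pvP]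
    | a :: b :: rest, _ =>
      rw [pvTree]
      have hlen : (a :: b :: rest).length = rest.length + 2 := by simp
      set ys := a :: b :: rest with hys
      set m := ys.length / 2 with hm
      have hm1 : 1 ≤ m := by omega
      have hmlt : m < ys.length := by omega
      have htake : (ys.take m).length = m := by
        rw [List.length_take]; omega
      have hdrop : (ys.drop m).length = ys.length - m := by
        rw [List.length_drop]
      have htne : ys.take m ≠ [] := by
        intro hc; rw [hc] at htake; simp at htake; omega
      have hdne : ys.drop m ≠ [] := by
        intro hc; rw [hc] at hdrop; simp at hdrop; omega
      have e1 : pvTree (ys.take m) = pvP (ys.take m) :=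
        ih (ys.take m).length (by omega) _ htne rfl
      have e2 : pvTree (ys.drop m) = pvP (ys.drop m) :=
        ih (ys.drop m).length (by omega) _ hdne rfl
      rw [e1, e2, ← pvP_append, List.take_append_drop]

-- A's guarded loop is the exact product clamped once at the end
theorem pvALoop_eq (xs : List Int) (p : Int) (hp : 1 ≤ p) (hle : p ≤ pvSqliteMax) :
    pvALoop p xs = min (p * pvP xs) pvSqliteMax := by
  induction xs generalizing p with
  | nil =>
    simp [pvALoop, pvP]
    omega
  | cons n rest ih =>
    have hk : (1 : Int) ≤ max 1 n := le_max_left 1 n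
    have hkpos : (0 : Int) < max 1 n := by omega
    have hdiv : PySem.Int.floordiv pvSqliteMax (max 1 n) = pvSqliteMax / max 1 n :=
      PySem.Int.floordiv_eq_ediv_of_pos hkpos
    have hPrest := pvP_pos rest
    rw [pvP_cons]
    by_cases hc : p > PySem.Int.floordiv pvSqliteMax (max 1 n)
    · have hmul : pvSqliteMax < p * max 1 n := by
        rw [hdiv] at hc
        by_contra hnot
        exact absurd ((Int.le_ediv_iff_mul_le hkpos).mpr (show p * max 1 n ≤ pvSqliteMax by omega)) (by omega)
      have hB : p * max 1 n ≤ p * max 1 n * pvP rest :=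
        le_mul_of_one_le_right (by nlinarith) hPrest
      simp only [pvALoop, if_pos hc]
      rw [← mul_assoc]
      omega
    · have hle' : p * max 1 n ≤ pvSqliteMax := by
        rw [hdiv] at hc
        have := (Int.le_ediv_iff_mul_le hkpos).mp (show p ≤ pvSqliteMax / max 1 n by omega)
        omega
      simp only [pvALoop, if_neg hc]
      rw [ih _ (by nlinarith) hle', ← mul_assoc]

-- ===== VERDICT (by name: the statement is the Claim_ definition above) =====
theorem safe_total_combos_py_spec : Claim_equal_safe_total_combos_py := by
  intro xs _
  unfold Spec_safe_total_combos_py safe_total_combos_py safe_total_combos_py_alt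
  by_cases h : xs = []
  · simp [h]
  · simp only [if_neg h]
    rw [pvALoop_eq xs 1 le_rfl (by decide), pvTree_eq xs h, one_mul]
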